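-- pv_equiv track=rewrite | github.com/fooying/fdomain | fdomain/cndomain.py | if_cn_word
-- ===== SOURCE A (Python) =====
-- def if_cn_word(word):
--     """
--     判断是否中文字符
--     """
--     ord0 = ord("0")
--     ord9 = ord("9")
--     orda = ord("a")
--     ordz = ord("z")
--     ord_ = ord("_")
--     is_cn = False
--     for w in word:
--         ordw = ord(w)
--         if not orda <= ordw <= ordz and not \
--                 ord0 <= ordw <= ord9 and ordw != ord_:
--             is_cn = True
--             break
--     return is_cn
-- ===== SOURCE B (Python) =====
-- def if_cn_word(word):
--     """
--     判断是否中文字符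
--     """
--     allowed = set("abcdefghijklmnopqrstuvwxyz0123456789_")
--     return bool(set(word) - allowed)
-- ===== Notes on version B (the rewrite author's own statement) =====
-- stated objective: simpler
-- what changed: Replaced the per-character ordinal-range loop with early exit by building the set of distinct characters once and testing whether its difference with a precomputed allowed-character set is non-empty.
import Mathlib
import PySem

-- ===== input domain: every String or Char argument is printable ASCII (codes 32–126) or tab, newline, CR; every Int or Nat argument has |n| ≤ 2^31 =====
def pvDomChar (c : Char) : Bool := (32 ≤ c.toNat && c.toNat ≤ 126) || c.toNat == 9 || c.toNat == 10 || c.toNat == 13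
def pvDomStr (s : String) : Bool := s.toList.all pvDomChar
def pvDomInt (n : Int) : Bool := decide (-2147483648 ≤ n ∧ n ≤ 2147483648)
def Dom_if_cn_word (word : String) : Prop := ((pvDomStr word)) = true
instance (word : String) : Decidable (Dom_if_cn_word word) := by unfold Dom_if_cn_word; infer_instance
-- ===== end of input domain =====

-- B replaces A's per-character ordinal-range loop with a set-difference test against a precomputed allowed set (simpler).

-- ===== PORT A =====
-- the loop 'for w in word: … break' with accumulator is_cn, as structural recursion
def ifCnLoop : List Char → Bool
  | [] => false
  | w :: rest =>
    let ordw := w.toNat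
    if ¬(97 ≤ ordw ∧ ordw ≤ 122) ∧ ¬(48 ≤ ordw ∧ ordw ≤ 57) ∧ ordw ≠ 95 then
      true
    else
      ifCnLoop rest

def if_cn_word (word : String) : Bool := ifCnLoop word.toList

-- ===== PORT B =====
-- allowed = set("abcdefghijklmnopqrstuvwxyz0123456789_")
def pvAllowed : PySem.Set Char := PySem.Set.ofList "abcdefghijklmnopqrstuvwxyz0123456789_".toList

-- bool(set(word) - allowed)
def if_cn_word_alt (word : String) : Bool :=
  decide (PySem.Set.diff (PySem.Set.ofList word.toList) pvAllowed ≠ [])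

-- ===== PRECONDITION & SPEC =====
def Spec_if_cn_word (word : String) (out : Bool) : Prop := out = if_cn_word_alt word
instance (word : String) (out : Bool) : Decidable (Spec_if_cn_word word out) := by unfold Spec_if_cn_word; infer_instance

-- ===== CLAIM (what is proved, stated in full; the proofs are below) =====
def Claim_equal_if_cn_word : Prop := ∀ (word : String), Dom_if_cn_word word → Spec_if_cn_word word (if_cn_word word)

-- ===== LEMMAS AND PROOFS =====

-- a character is in the allowed set iff its code is a lowercase letter, digit, or underscore
lemma mem_pvAllowed_iff (c : Char) :
    c ∈ pvAllowed ↔ (97 ≤ c.toNat ∧ c.toNat ≤ 122) ∨ (48 ≤ c.toNat ∧ c.toNat ≤ 57) ∨ c.toNat = 95 := by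
  have hdet : ∀ d : Char, c.toNat = d.toNat → c = d := fun d hd => Char.ext (UInt32.toNat_inj.mp hd)
  have key : c ∈ pvAllowed ↔ c.toNat ∈ pvAllowed.map Char.toNat := by
    rw [List.mem_map]
    exact ⟨fun h => ⟨c, h, rfl⟩, fun ⟨d, hd, he⟩ => by rw [hdet d he.symm]; exact hd⟩
  rw [key, show pvAllowed.map Char.toNat =
      [97, 98, 99, 100, 101, 102, 103, 104, 105, 106, 107, 108, 109, 110, 111, 112, 113, 114,
       115, 116, 117, 118, 119, 120, 121, 122, 48, 49, 50, 51, 52, 53, 54, 55, 56, 57, 95]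
      from by decide]
  simp only [List.mem_cons, List.not_mem_nil, or_false]
  omega

lemma ifCnLoop_eq_any (l : List Char) :
    ifCnLoop l = l.any (fun c => decide (c ∉ pvAllowed)) := by
  induction l with
  | nil => rfl
  | cons w rest ih =>
    simp only [ifCnLoop, List.any_cons]
    split_ifs with hb
    · have hn : w ∉ pvAllowed := by rw [mem_pvAllowed_iff]; omega
      simp [hn]
    · have hm : w ∈ pvAllowed := by
        rw [mem_pvAllowed_iff]
        by_contra hc
        push Not at hc
        exact hb ⟨by omega, by omega, by omega⟩
      simp [hm, ih]

-- ===== VERDICT (by name: the statement is the Claim_ definition above) =====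
theorem if_cn_word_spec : Claim_equal_if_cn_word := by
  intro word _
  unfold Spec_if_cn_word if_cn_word if_cn_word_alt
  rw [ifCnLoop_eq_any]
  rcases hb : (word.toList.any (fun c => decide (c ∉ pvAllowed))) with _ | _
  · simp only [List.any_eq_false] at hb
    have hnil : PySem.Set.diff (PySem.Set.ofList word.toList) pvAllowed = [] := by
      rw [List.eq_nil_iff_forall_not_mem]
      intro x hx
      rw [PySem.Set.mem_diff, PySem.Set.mem_ofList] at hx
      exact absurd (by simpa using hb x hx.1) (by simp [hx.2])
    simp [hnil]
  · simp only [List.any_eq_true] at hb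
    obtain ⟨x, hx, hxn⟩ := hb
    have hmem : x ∈ PySem.Set.diff (PySem.Set.ofList word.toList) pvAllowed := by
      rw [PySem.Set.mem_diff, PySem.Set.mem_ofList]
      exact ⟨hx, by simpa using hxn⟩
    have hne : PySem.Set.diff (PySem.Set.ofList word.toList) pvAllowed ≠ [] := by
      intro hnil; rw [hnil] at hmem; simp at hmem
    simp [hne]
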